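-- pv_equiv track=rewrite | github.com/kyrie-eleison/codingTestStudy | ch13 DP/36.py | solution
-- ===== SOURCE A (Python) =====
-- def solution(string1, string2):
--
--     d = [[0]*(len(string2)+1) for _ in range(len(string1)+1)]
--
--     for i in range(1, len(string1)+1):
--         for j in range(1, len(string2)+1):
--             if string1[i-1] == string2[j-1]:
--                 d[i][j] = d[i-1][j-1] + 1
--             else:
--                 d[i][j] = max(d[i-1][j], d[i][j-1])
--
--     L_ij = d[len(string1)][len(string2)]
--
--     return len(string2) - L_ij
-- ===== SOURCE B (Python) =====
-- def solution(string1, string2):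
--     # Top-down memoized recursion instead of A's bottom-up filled table.
--     memo = {}
--
--     def lcs(i, j):
--         key = (i, j)
--         if key in memo:
--             return memo[key]
--         if i == 0 or j == 0:
--             v = 0
--         elif string1[i - 1] == string2[j - 1]:
--             v = lcs(i - 1, j - 1) + 1
--         else:
--             v = max(lcs(i - 1, j), lcs(i, j - 1))
--         memo[key] = v
--         return v
--
--     return len(string2) - lcs(len(string1), len(string2))
-- ===== Notes on version B (the rewrite author's own statement) =====
-- stated objective: alternative
-- what changed: Replaces A's bottom-up 2-D table filled by nested index loops with a top-down recursive lcs(i,j) memoized in a dict, visiting only the subproblems the recursion demands and returning len(string2) - lcs(m,n).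
import Mathlib
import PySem

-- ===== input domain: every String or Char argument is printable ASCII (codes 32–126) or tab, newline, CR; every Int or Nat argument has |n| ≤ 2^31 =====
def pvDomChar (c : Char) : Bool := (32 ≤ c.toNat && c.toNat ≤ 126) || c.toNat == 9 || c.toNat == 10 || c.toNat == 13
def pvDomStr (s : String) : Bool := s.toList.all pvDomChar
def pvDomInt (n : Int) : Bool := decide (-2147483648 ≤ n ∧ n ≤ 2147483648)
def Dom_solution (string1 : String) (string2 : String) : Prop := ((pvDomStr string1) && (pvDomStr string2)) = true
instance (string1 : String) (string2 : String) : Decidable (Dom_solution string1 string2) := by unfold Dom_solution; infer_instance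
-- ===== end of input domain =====

-- B replaces A's bottom-up filled (m+1)×(n+1) table with a top-down recursive
-- lcs(i,j) memoized in a dict; objective: alternative (same value, demand-driven traversal).

-- ===== PORT A =====
-- Inner loop body: 'd[i][j] = d[i-1][j-1]+1 if chars match else max(d[i-1][j], d[i][j-1])'.
-- All indices are Nats in range (i ∈ [1,m], j ∈ [1,n]), so Python's s[i-1]/d[i][j] are
-- exactly List.getD / List.set here (no negative or out-of-range index is ever reached).
def innerStepA (s1 s2 : List Char) (i : Nat) (d : List (List Int)) (j0 : Nat) : List (List Int) :=
  let j := j0 + 1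
  let rowPrev := d.getD (i-1) []
  let rowI := d.getD i []
  let v : Int :=
    if s1.getD (i-1) ' ' = s2.getD (j-1) ' ' then rowPrev.getD (j-1) 0 + 1
    else max (rowPrev.getD j 0) (rowI.getD (j-1) 0)
  d.set i (rowI.set j v)

-- Outer loop body: 'for j in range(1, len(string2)+1): …' (j = j0+1, j0 ∈ range n).
def outerStepA (s1 s2 : List Char) (d : List (List Int)) (i0 : Nat) : List (List Int) :=
  (List.range s2.length).foldl (innerStepA s1 s2 (i0+1)) d

def solution (string1 : String) (string2 : String) : Int :=
  let s1 := string1.toList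
  let s2 := string2.toList
  let m := s1.length
  let n := s2.length
  -- d = [[0]*(len(string2)+1) for _ in range(len(string1)+1)]
  let d0 : List (List Int) := (List.range (m+1)).map (fun _ => List.replicate (n+1) (0:Int))
  -- for i in range(1, len(string1)+1): …  (i = i0+1, i0 ∈ range m)
  let d := (List.range m).foldl (outerStepA s1 s2) d0
  let Lij := (d.getD m []).getD n 0
  (n : Int) - Lij

-- ===== PORT B =====
-- 'def lcs(i, j): …' threading the memo dict through the recursion; 'key in memo' /
-- 'memo[key]' / 'memo[key] = v' are Dict.get? / Dict.insert on keys (i, j).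
-- i, j are Nats in [0, m]×[0, n], so string1[i-1]/string2[j-1] (reached only when
-- i, j ≥ 1) are exactly List.getD.
def lcsMemoB (s1 s2 : List Char) : Nat → Nat → PySem.Dict (Nat × Nat) Int →
    Int × PySem.Dict (Nat × Nat) Int
  | i, j, memo =>
    match memo.get? (i, j) with
    | some v => (v, memo)
    | none =>
      if h : i = 0 ∨ j = 0 then
        (0, memo.insert (i, j) 0)
      else if s1.getD (i-1) ' ' = s2.getD (j-1) ' ' then
        let r := lcsMemoB s1 s2 (i-1) (j-1) memo
        (r.1 + 1, r.2.insert (i, j) (r.1 + 1))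
      else
        let r1 := lcsMemoB s1 s2 (i-1) j memo
        let r2 := lcsMemoB s1 s2 i (j-1) r1.2
        (max r1.1 r2.1, r2.2.insert (i, j) (max r1.1 r2.1))
  termination_by i j _ => i + j
  decreasing_by all_goals omega

def solution_alt (string1 : String) (string2 : String) : Int :=
  let s1 := string1.toList
  let s2 := string2.toList
  (s2.length : Int) - (lcsMemoB s1 s2 s1.length s2.length PySem.Dict.empty).1

-- ===== PRECONDITION & SPEC =====
def Spec_solution (string1 : String) (string2 : String) (out : Int) : Prop := out = solution_alt string1 string2
instance (string1 : String) (string2 : String) (out : Int) : Decidable (Spec_solution string1 string2 out) := by unfold Spec_solution; infer_instance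

-- ===== CLAIM (what is proved, stated in full; the proofs are below) =====
def Claim_equal_solution : Prop := ∀ (string1 : String) (string2 : String), Dom_solution string1 string2 → Spec_solution string1 string2 (solution string1 string2)

-- ===== LEMMAS AND PROOFS =====

-- The common spec: T s1 s2 i j = LCS length of the first i chars of s1 and first j of s2.
def T (s1 s2 : List Char) : Nat → Nat → Int
  | 0, _ => 0
  | _+1, 0 => 0
  | i+1, j+1 =>
      if s1.getD i ' ' = s2.getD j ' ' then T s1 s2 i j + 1
      else max (T s1 s2 i (j+1)) (T s1 s2 (i+1) j)
  termination_by i j => (i, j)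

theorem T_zero_right (s1 s2 : List Char) (i : Nat) : T s1 s2 i 0 = 0 := by
  cases i <;> simp [T]

theorem rowT_zero (s1 s2 : List Char) (n : Nat) :
    (List.range (n+1)).map (T s1 s2 0) = List.replicate (n+1) (0:Int) := by
  apply List.ext_getElem <;> simp [T]

theorem mapRange_getD {α : Type} (f : Nat → α) (d : α) {k N : Nat} (h : k < N) :
    ((List.range N).map f).getD k d = f k := by
  simp [List.getD_eq_getElem?_getD, h]

theorem mapRange_set {α : Type} (f : Nat → α) (v : α) (k N : Nat) :
    ((List.range N).map f).set k v = (List.range N).map (fun x => if x = k then v else f x) := by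
  apply List.ext_getElem
  · simp
  · intro i h1 h2
    simp only [List.length_set, List.length_map, List.length_range] at h1
    rcases eq_or_ne i k with rfl | hne
    · simp
    · simp only [List.getElem_set, List.getElem_map, List.getElem_range]
      rw [if_neg (Ne.symm hne), if_neg hne]

-- ---- A side ----
def Prow (s1 s2 : List Char) (n i j : Nat) : List Int :=
  (List.range (n+1)).map (fun j' => if j' ≤ j then T s1 s2 i j' else 0)

def Etab (s1 s2 : List Char) (m n i j : Nat) : List (List Int) :=
  (List.range (m+1)).map (fun k =>
    if k < i then (List.range (n+1)).map (T s1 s2 k)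
    else if k = i then Prow s1 s2 n i j
    else List.replicate (n+1) (0:Int))

def Dtab (s1 s2 : List Char) (m n i : Nat) : List (List Int) :=
  (List.range (m+1)).map (fun k =>
    if k ≤ i then (List.range (n+1)).map (T s1 s2 k)
    else List.replicate (n+1) (0:Int))

theorem Prow_last (s1 s2 : List Char) (n i : Nat) :
    Prow s1 s2 n i n = (List.range (n+1)).map (T s1 s2 i) := by
  apply List.map_congr_left
  intro a ha
  simp only [List.mem_range] at ha
  simp [Nat.lt_succ_iff.mp ha]

theorem Prow_zero (s1 s2 : List Char) (n i : Nat) :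
    Prow s1 s2 n i 0 = List.replicate (n+1) (0:Int) := by
  apply List.ext_getElem
  · simp [Prow]
  · intro j h1 h2
    simp only [Prow, List.getElem_map, List.getElem_range, List.getElem_replicate]
    split_ifs with hj
    · have : j = 0 := by omega
      subst this
      exact T_zero_right s1 s2 i
    · rfl

theorem Etab_zero (s1 s2 : List Char) (m n i0 : Nat) :
    Etab s1 s2 m n (i0+1) 0 = Dtab s1 s2 m n i0 := by
  apply List.map_congr_left
  intro k _
  rcases lt_trichotomy k (i0+1) with h | h | h
  · simp [h, Nat.lt_succ_iff.mp h]
  · subst h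
    have h1 : ¬ (i0+1 ≤ i0) := by omega
    simp [h1, Prow_zero]
  · have h1 : ¬ k < i0 + 1 := by omega
    have h2 : k ≠ i0 + 1 := by omega
    have h3 : ¬ k ≤ i0 := by omega
    simp [h1, h2, h3]

theorem Etab_last (s1 s2 : List Char) (m n i : Nat) :
    Etab s1 s2 m n i n = Dtab s1 s2 m n i := by
  apply List.map_congr_left
  intro k _
  rcases lt_trichotomy k i with h | h | h
  · simp [h, Nat.le_of_lt h]
  · subst h; simp [Prow_last]
  · have h1 : ¬ k < i := by omega
    have h2 : k ≠ i := by omega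
    have h3 : ¬ k ≤ i := by omega
    simp [h1, h2, h3]

theorem innerStepA_spec (s1 s2 : List Char) (m n i0 j0 : Nat)
    (hi : i0 < m) (hj : j0 < n) (hm : m = s1.length) (hn : n = s2.length) :
    innerStepA s1 s2 (i0+1) (Etab s1 s2 m n (i0+1) j0) j0 = Etab s1 s2 m n (i0+1) (j0+1) := by
  have hgi0 : (Etab s1 s2 m n (i0+1) j0).getD i0 [] = (List.range (n+1)).map (T s1 s2 i0) := by
    unfold Etab
    rw [mapRange_getD _ _ (show i0 < m+1 by omega)]
    simp
  have hgi1 : (Etab s1 s2 m n (i0+1) j0).getD (i0+1) [] = Prow s1 s2 n (i0+1) j0 := by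
    unfold Etab
    rw [mapRange_getD _ _ (show i0+1 < m+1 by omega)]
    simp
  have hP : (Prow s1 s2 n (i0+1) j0).getD j0 0 = T s1 s2 (i0+1) j0 := by
    unfold Prow
    rw [mapRange_getD _ _ (show j0 < n+1 by omega)]
    simp
  unfold innerStepA
  simp only [Nat.add_sub_cancel]
  rw [hgi0, hgi1, hP,
    mapRange_getD (T s1 s2 i0) 0 (show j0 < n+1 by omega),
    mapRange_getD (T s1 s2 i0) 0 (show j0+1 < n+1 by omega)]
  have hv : (if s1.getD i0 ' ' = s2.getD j0 ' ' then T s1 s2 i0 j0 + 1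
      else max (T s1 s2 i0 (j0+1)) (T s1 s2 (i0+1) j0)) = T s1 s2 (i0+1) (j0+1) := by
    rw [T]
  rw [hv]
  have hrow : (Prow s1 s2 n (i0+1) j0).set (j0+1) (T s1 s2 (i0+1) (j0+1))
      = Prow s1 s2 n (i0+1) (j0+1) := by
    unfold Prow
    rw [mapRange_set]
    apply List.map_congr_left
    intro a _
    rcases eq_or_ne a (j0+1) with rfl | hne
    · simp
    · have hle : a ≤ j0+1 ↔ a ≤ j0 := by omega
      simp [hne, hle]
  rw [hrow]
  unfold Etab
  rw [mapRange_set]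
  apply List.map_congr_left
  intro k _
  rcases eq_or_ne k (i0+1) with rfl | hne
  · simp
  · simp [hne]

theorem innerFoldA (s1 s2 : List Char) (m n i0 : Nat)
    (hi : i0 < m) (hm : m = s1.length) (hn : n = s2.length) :
    ∀ (cnt j0 : Nat), j0 + cnt = n →
      (List.range' j0 cnt).foldl (innerStepA s1 s2 (i0+1)) (Etab s1 s2 m n (i0+1) j0)
        = Etab s1 s2 m n (i0+1) n := by
  intro cnt
  induction cnt with
  | zero =>
      intro j0 h
      have : j0 = n := by omega
      subst this
      simp
  | succ c ih =>
      intro j0 h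
      rw [List.range'_succ, List.foldl_cons,
        innerStepA_spec s1 s2 m n i0 j0 hi (by omega) hm hn]
      exact ih (j0+1) (by omega)

theorem outerFoldA (s1 s2 : List Char) (m n : Nat) (hm : m = s1.length) (hn : n = s2.length) :
    ∀ (cnt i0 : Nat), i0 + cnt = m →
      (List.range' i0 cnt).foldl (outerStepA s1 s2) (Dtab s1 s2 m n i0) = Dtab s1 s2 m n m := by
  intro cnt
  induction cnt with
  | zero =>
      intro i0 h
      have : i0 = m := by omega
      subst this
      simp
  | succ c ih =>
      intro i0 h
      rw [List.range'_succ, List.foldl_cons]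
      have : outerStepA s1 s2 (Dtab s1 s2 m n i0) i0 = Dtab s1 s2 m n (i0+1) := by
        unfold outerStepA
        rw [← hn, ← Etab_zero, List.range_eq_range',
          innerFoldA s1 s2 m n i0 (by omega) hm hn n 0 (by omega), Etab_last]
      rw [this]
      exact ih (i0+1) (by omega)

theorem solutionA_eq (string1 string2 : String) :
    solution string1 string2
      = (string2.toList.length : Int)
        - T string1.toList string2.toList string1.toList.length string2.toList.length := by
  simp only [solution]
  have hd0 : (List.range (string1.toList.length+1)).map
        (fun _ => List.replicate (string2.toList.length+1) (0:Int))
      = Dtab string1.toList string2.toList string1.toList.length string2.toList.length 0 := by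
    unfold Dtab
    apply List.map_congr_left
    intro k _
    by_cases hk : k = 0
    · subst hk
      simp [rowT_zero]
    · have : ¬ k ≤ 0 := by omega
      simp [this]
  rw [hd0, List.range_eq_range',
    outerFoldA string1.toList string2.toList string1.toList.length string2.toList.length rfl rfl
      string1.toList.length 0 (by omega)]
  unfold Dtab
  rw [mapRange_getD _ _ (show string1.toList.length < string1.toList.length+1 by omega)]
  simp only [le_refl, if_true]
  rw [mapRange_getD _ _ (show string2.toList.length < string2.toList.length+1 by omega)]

-- ---- B side ----
-- Memo invariant: every cached value is the corresponding T value.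
def InvB (s1 s2 : List Char) (memo : PySem.Dict (Nat × Nat) Int) : Prop :=
  ∀ (i j : Nat) (v : Int), memo.get? (i, j) = some v → v = T s1 s2 i j

theorem InvB_insert (s1 s2 : List Char) (memo : PySem.Dict (Nat × Nat) Int)
    (hI : InvB s1 s2 memo) (i j : Nat) (hv : v = T s1 s2 i j) :
    InvB s1 s2 (memo.insert (i, j) v) := by
  intro i' j' v' h
  rw [PySem.Dict.get?_insert] at h
  split_ifs at h with he
  · cases h
    obtain ⟨h1, h2⟩ := Prod.mk.injEq .. ▸ he
    subst h1; subst h2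
    exact hv
  · exact hI i' j' v' h

theorem lcsMemoB_spec (s1 s2 : List Char) :
    ∀ (N i j : Nat) (memo : PySem.Dict (Nat × Nat) Int), i + j ≤ N → InvB s1 s2 memo →
      (lcsMemoB s1 s2 i j memo).1 = T s1 s2 i j ∧ InvB s1 s2 (lcsMemoB s1 s2 i j memo).2 := by
  intro N
  induction N with
  | zero =>
      intro i j memo hle hI
      have hi : i = 0 := by omega
      have hj : j = 0 := by omega
      subst hi; subst hj
      rw [lcsMemoB]
      cases hm : memo.get? (0, 0) with
      | some v => exact ⟨hI 0 0 v hm, hI⟩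
      | none =>
          exact ⟨(T_zero_right s1 s2 0).symm,
            InvB_insert s1 s2 memo hI 0 0 (T_zero_right s1 s2 0).symm⟩
  | succ N ih =>
      intro i j memo hle hI
      rw [lcsMemoB]
      cases hm : memo.get? (i, j) with
      | some v => exact ⟨hI i j v hm, hI⟩
      | none =>
          by_cases h0 : i = 0 ∨ j = 0
          · simp only [dif_pos h0]
            have hT : T s1 s2 i j = 0 := by
              rcases h0 with rfl | rfl
              · simp [T]
              · exact T_zero_right s1 s2 i
            exact ⟨hT.symm, InvB_insert s1 s2 memo hI i j hT.symm⟩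
          · simp only [dif_neg h0]
            obtain ⟨a, rfl⟩ : ∃ a, i = a + 1 := ⟨i - 1, by omega⟩
            obtain ⟨b, rfl⟩ : ∃ b, j = b + 1 := ⟨j - 1, by omega⟩
            simp only [Nat.add_sub_cancel]
            by_cases hc : s1.getD a ' ' = s2.getD b ' '
            · simp only [if_pos hc]
              obtain ⟨h1, h2⟩ := ih a b memo (by omega) hI
              refine ⟨?_, InvB_insert s1 s2 _ h2 (a+1) (b+1) ?_⟩ <;>
                rw [T, if_pos hc, h1]
            · simp only [if_neg hc]
              obtain ⟨h1, h2⟩ := ih a (b+1) memo (by omega) hI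
              obtain ⟨h3, h4⟩ := ih (a+1) b _ (by omega) h2
              refine ⟨?_, InvB_insert s1 s2 _ h4 (a+1) (b+1) ?_⟩ <;>
                rw [T, if_neg hc, h1, h3]

theorem solutionB_eq (string1 string2 : String) :
    solution_alt string1 string2
      = (string2.toList.length : Int)
        - T string1.toList string2.toList string1.toList.length string2.toList.length := by
  simp only [solution_alt]
  have hI : InvB string1.toList string2.toList PySem.Dict.empty := by
    intro i j v h
    simp [PySem.Dict.get?_empty] at h
  rw [(lcsMemoB_spec string1.toList string2.toList
    (string1.toList.length + string2.toList.length) _ _ _ le_rfl hI).1]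

-- ===== VERDICT (by name: the statement is the Claim_ definition above) =====
theorem solution_spec : Claim_equal_solution := by
  intro string1 string2 _
  unfold Spec_solution
  rw [solutionA_eq, solutionB_eq]
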